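-- pv_equiv track=rewrite | github.com/Myxcil/AdventOfCode2021 | Day10/day10_main.py | append_missing
-- ===== SOURCE A (Python) =====
-- open_marker = {'(': ')', '[': ']', '{': '}', '<': '>'}
--
-- points_completed = {')': 1, ']': 2, '}': 3, '>': 4}
--
-- def append_missing(chunk: str) -> int:
--     stack: [chr] = []
--     score = 0
--     for x in chunk:
--         if x in open_marker:
--             stack.append(x)
--         else:
--             pc = stack.pop()
--
--     while len(stack) > 0:
--         pc = stack.pop()
--         score *= 5
--         score += points_completed[open_marker[pc]]
--     return score
-- ===== SOURCE B (Python) =====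
-- open_marker = {'(': ')', '[': ']', '{': '}', '<': '>'}
--
-- points_completed = {')': 1, ']': 2, '}': 3, '>': 4}
--
-- def append_missing(chunk: str) -> int:
--     # single pass with a running score: when an opener is pushed at depth d it
--     # contributes points * 5**d; a close undoes the top contribution.  No drain
--     # loop at the end -- the score is already final.
--     score = 0
--     pow5 = 1
--     vals = []
--     for x in chunk:
--         if x in open_marker:
--             p = points_completed[open_marker[x]]
--             vals.append(p)
--             score += p * pow5
--             pow5 *= 5
--         else:
--             pow5 //= 5
--             score -= vals.pop() * pow5
--     return score
-- ===== Notes on version B (the rewrite author's own statement) =====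
-- stated objective: alternative
-- what changed: Replaces A's two phases (build the full unmatched-opener stack, then drain it top-down with a multiply-accumulate Horner loop) by a single pass that maintains the final score incrementally: pushing an opener at depth d adds its points times 5**d, a close subtracts the top contribution, so no second loop exists.
import Mathlib
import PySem

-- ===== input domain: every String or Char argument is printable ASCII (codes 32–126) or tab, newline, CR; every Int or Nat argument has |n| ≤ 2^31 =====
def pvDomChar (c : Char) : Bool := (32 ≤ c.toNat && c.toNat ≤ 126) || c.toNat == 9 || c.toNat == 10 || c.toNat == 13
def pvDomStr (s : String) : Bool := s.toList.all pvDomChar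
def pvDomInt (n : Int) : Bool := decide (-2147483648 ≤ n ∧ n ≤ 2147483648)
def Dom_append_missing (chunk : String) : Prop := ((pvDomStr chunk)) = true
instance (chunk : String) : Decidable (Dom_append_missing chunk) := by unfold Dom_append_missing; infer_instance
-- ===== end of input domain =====

-- B replaces A's two phases (build the whole stack, then a pop-and-multiply drain
-- loop) by a single pass that maintains the running score incrementally (objective:
-- alternative).  B mutates a local list only; neither program mutates its argument.

-- shared module constants of both Pythons
def pvOpenMarker : PySem.Dict Char Char :=
  PySem.Dict.ofList [('(', ')'), ('[', ']'), ('{', '}'), ('<', '>')]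

def pvPointsCompleted : PySem.Dict Char Int :=
  PySem.Dict.ofList [(')', 1), (']', 2), ('}', 3), ('>', 4)]

-- points_completed[open_marker[c]]; both Pythons only evaluate it on opener chars,
-- where both lookups hit, so the KeyError defaults are never reached.
def pvPts (pc : Char) : Int :=
  (pvPointsCompleted.get? ((pvOpenMarker.get? pc).getD ' ')).getD 0

-- ===== PORT A =====
-- one step of A's `for x in chunk` loop; state none = IndexError already raised
def pvStepA (st : Option (List Char)) (x : Char) : Option (List Char) :=
  match st with
  | none => none
  | some stack =>
    if (pvOpenMarker.get? x).isSome then some (stack ++ [x])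
    else
      match PySem.List.pop? stack with
      | some r => some r.2
      | none => none          -- stack.pop() on empty list: IndexError (outside Pre_)

-- A's `while len(stack) > 0` drain loop
def pvDrain (stack : List Char) (score : Int) : Int :=
  match h : PySem.List.pop? stack with
  | none => score
  | some r => pvDrain r.2 (score * 5 + pvPts r.1)
termination_by stack.length
decreasing_by have := PySem.List.length_of_pop?_eq_some stack h; omega

def append_missing (chunk : String) : Int :=
  match chunk.toList.foldl pvStepA (some []) with
  | some stack => pvDrain stack 0
  | none => 0                 -- Python raised IndexError in the for-loop (outside Pre_)

-- ===== PORT B =====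
-- one step of B's single loop over (score, pow5, vals); none = IndexError raised
def pvStepB (st : Option (Int × Int × List Int)) (x : Char) : Option (Int × Int × List Int) :=
  match st with
  | none => none
  | some (score, pow5, vals) =>
    if (pvOpenMarker.get? x).isSome then
      let p := (pvPointsCompleted.get? ((pvOpenMarker.get? x).getD ' ')).getD 0
      some (score + p * pow5, pow5 * 5, vals ++ [p])
    else
      let pow5' := PySem.Int.floordiv pow5 5      -- pow5 //= 5 happens before the pop
      match PySem.List.pop? vals with
      | some r => some (score - r.1 * pow5', pow5', r.2)
      | none => none          -- vals.pop() on empty list: IndexError (outside Pre_)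

def append_missing_alt (chunk : String) : Int :=
  match chunk.toList.foldl pvStepB (some (0, 1, [])) with
  | some st => st.1
  | none => 0                 -- Python raised IndexError (outside Pre_)

-- ===== PRECONDITION & SPEC =====
def pvIsOpen (c : Char) : Bool := c == '(' || c == '[' || c == '{' || c == '<'

-- Pre_ excludes exactly the strings in which some non-opener character is preceded by
-- fewer openers than non-openers: there both Pythons' .pop() raises IndexError.
def Pre_append_missing (chunk : String) : Prop :=
  ∀ n < chunk.toList.length + 1,
    (chunk.toList.take n).countP (fun c => !pvIsOpen c) ≤ (chunk.toList.take n).countP pvIsOpen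

instance (chunk : String) : Decidable (Pre_append_missing chunk) := by
  unfold Pre_append_missing; infer_instance

def pvWitness_append_missing : String := "<{(["

def Spec_append_missing (chunk : String) (out : Int) : Prop := out = append_missing_alt chunk
instance (chunk : String) (out : Int) : Decidable (Spec_append_missing chunk out) := by unfold Spec_append_missing; infer_instance

-- ===== CLAIM (what is proved, stated in full; the proofs are below) =====
def Claim_equal_append_missing : Prop := ∀ (chunk : String), Dom_append_missing chunk → Pre_append_missing chunk → Spec_append_missing chunk (append_missing chunk)

-- ===== LEMMAS AND PROOFS =====

-- value of A's stack (bottom = head, weighted 5^0)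
def pvVal : List Char → Int
  | [] => 0
  | c :: t => pvPts c + 5 * pvVal t

theorem pvVal_append (s : List Char) (x : Char) :
    pvVal (s ++ [x]) = pvVal s + pvPts x * 5 ^ s.length := by
  induction s with
  | nil => simp [pvVal]
  | cons c t ih => simp [pvVal, ih]; ring

theorem pvHorner_shift (r : List Char) (sc : Int) :
    r.foldl (fun a pc => a * 5 + pvPts pc) sc
      = sc * 5 ^ r.length + r.foldl (fun a pc => a * 5 + pvPts pc) 0 := by
  induction r generalizing sc with
  | nil => simp
  | cons c t ih =>
      simp only [List.foldl_cons, List.length_cons]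
      rw [ih (sc * 5 + pvPts c), ih (0 * 5 + pvPts c)]
      ring

-- A's drain loop is Horner over the reversed stack
theorem pvDrain_eq_horner (stack : List Char) (score : Int) :
    pvDrain stack score = stack.reverse.foldl (fun a pc => a * 5 + pvPts pc) score := by
  induction stack using List.reverseRecOn generalizing score with
  | nil => rw [pvDrain]; rfl
  | append_singleton xs x ih =>
      rw [pvDrain]
      split
      · rename_i h; rw [PySem.List.pop?_last] at h; cases h
      · rename_i r h; rw [PySem.List.pop?_last] at h
        cases h
        simp only [List.reverse_append, List.reverse_cons, List.reverse_nil, List.nil_append,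
          List.singleton_append, List.foldl_cons]
        exact ih _

-- A's drain loop computes pvVal of the stack
theorem pvDrain_eq_val (stack : List Char) : pvDrain stack 0 = pvVal stack := by
  induction stack using List.reverseRecOn with
  | nil => rw [pvDrain]; rfl
  | append_singleton xs x ih =>
      rw [pvDrain]
      split
      · rename_i h; rw [PySem.List.pop?_last] at h; cases h
      · rename_i r h; rw [PySem.List.pop?_last] at h
        cases h
        rw [pvVal_append, ← ih]
        rw [pvDrain_eq_horner, pvDrain_eq_horner, pvHorner_shift]
        simp only [List.length_reverse]
        ring

theorem pvFoldA_none (l : List Char) : l.foldl pvStepA none = none := by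
  induction l with
  | nil => rfl
  | cons x t ih => simpa [pvStepA] using ih

theorem pvFoldB_none (l : List Char) : l.foldl pvStepB none = none := by
  induction l with
  | nil => rfl
  | cons x t ih => simpa [pvStepB] using ih

-- the loop invariant tying B's running state to A's stack
theorem pvStep_invariant (l : List Char) (stack : List Char) :
    l.foldl pvStepB (some (pvVal stack, 5 ^ stack.length, stack.map pvPts))
      = (l.foldl pvStepA (some stack)).map
          (fun s => (pvVal s, (5:Int) ^ s.length, s.map pvPts)) := by
  induction l generalizing stack with
  | nil => rfl
  | cons x t ih =>
      simp only [List.foldl_cons]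
      by_cases hx : (pvOpenMarker.get? x).isSome
      · rw [show pvStepB (some (pvVal stack, 5 ^ stack.length, stack.map pvPts)) x
            = some (pvVal (stack ++ [x]), 5 ^ (stack ++ [x]).length, (stack ++ [x]).map pvPts) from ?_,
           show pvStepA (some stack) x = some (stack ++ [x]) from ?_]
        · exact ih (stack ++ [x])
        · simp [pvStepA, hx]
        · simp only [pvStepB, hx, if_pos]
          refine congrArg some ?_
          simp only [pvVal_append, pvPts, List.map_append, List.map_cons,
            List.map_nil, List.length_append, List.length_cons, List.length_nil, pow_succ]
      · cases stack using List.reverseRecOn with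
        | nil =>
            rw [show pvStepB (some (pvVal [], 5 ^ ([]:List Char).length, ([]:List Char).map pvPts)) x = none from ?_,
               show pvStepA (some []) x = none from ?_]
            · simp [pvFoldA_none, pvFoldB_none]
            · simp [pvStepA, hx, PySem.List.pop?]
            · simp [pvStepB, hx, PySem.List.pop?]
        | append_singleton s y _ =>
            rw [show pvStepA (some (s ++ [y])) x = some s from ?_,
               show pvStepB (some (pvVal (s ++ [y]), 5 ^ (s ++ [y]).length, (s ++ [y]).map pvPts)) x
                  = some (pvVal s, 5 ^ s.length, s.map pvPts) from ?_]
            · exact ih s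
            · simp only [pvStepB, hx, if_neg, Bool.not_eq_true, List.map_append, List.map_cons,
                List.map_nil, PySem.List.pop?_last]
              refine congrArg some (Prod.ext ?_ (Prod.ext ?_ rfl))
              · have : PySem.Int.floordiv (5 ^ (s ++ [y]).length) 5 = 5 ^ s.length := by
                  rw [List.length_append, List.length_cons, List.length_nil,
                    PySem.Int.floordiv_eq_ediv_of_pos (by norm_num), pow_succ]
                  exact Int.mul_ediv_cancel _ (by norm_num)
                simp only [this, pvVal_append]; ring
              · rw [List.length_append, List.length_cons, List.length_nil,
                  PySem.Int.floordiv_eq_ediv_of_pos (by norm_num), pow_succ]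
                exact Int.mul_ediv_cancel _ (by norm_num)
            · simp [pvStepA, hx, PySem.List.pop?_last]

theorem pvStep_inv0 (l : List Char) :
    l.foldl pvStepB (some (0, 1, []))
      = (l.foldl pvStepA (some [])).map
          (fun s => (pvVal s, (5:Int) ^ s.length, s.map pvPts)) :=
  pvStep_invariant l []

-- ===== VERDICT (by name: the statement is the Claim_ definition above) =====
theorem append_missing_spec : Claim_equal_append_missing := by
  intro chunk _ _
  unfold Spec_append_missing append_missing append_missing_alt
  rw [pvStep_inv0]
  cases chunk.toList.foldl pvStepA (some []) with
  | none => rfl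
  | some stack => simpa using pvDrain_eq_val stack
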